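-- pv_equiv track=rewrite | github.com/Xenxlx/cribbage | main.py | check_of_a_kind_pegging
-- ===== SOURCE A (Python) =====
-- def check_of_a_kind_pegging(peg_sequence) -> int:
--     tally = 1
--     if not len(peg_sequence):
--         return 0
--
--     i = 1
--     while i < len(peg_sequence):
--         if peg_sequence[i][0] == peg_sequence[i - 1][0]:
--             tally += 1
--         i += 1
--     return tally
-- ===== SOURCE B (Python) =====
-- def check_of_a_kind_pegging(peg_sequence) -> int:
--     if not peg_sequence:
--         return 0
--     # run-length grouping: skip over each maximal run of equal rank, counting groups;
--     # a run of length s contributes s-1 adjacent matches, so tally = n - groups + 1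
--     n = len(peg_sequence)
--     groups = 0
--     i = 0
--     while i < n:
--         rank = peg_sequence[i][0]
--         i += 1
--         while i < n and peg_sequence[i][0] == rank:
--             i += 1
--         groups += 1
--     return n - groups + 1
-- ===== Notes on version B (the rewrite author's own statement) =====
-- stated objective: alternative
-- what changed: B does run-length grouping: an outer loop jumps from run head to run head via an inner scan finding each maximal same-rank run's end, counts the groups g, and returns n - g + 1 arithmetically, instead of A's single neighbour-by-neighbour loop incrementing a tally on each matching pair.
import Mathlib
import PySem

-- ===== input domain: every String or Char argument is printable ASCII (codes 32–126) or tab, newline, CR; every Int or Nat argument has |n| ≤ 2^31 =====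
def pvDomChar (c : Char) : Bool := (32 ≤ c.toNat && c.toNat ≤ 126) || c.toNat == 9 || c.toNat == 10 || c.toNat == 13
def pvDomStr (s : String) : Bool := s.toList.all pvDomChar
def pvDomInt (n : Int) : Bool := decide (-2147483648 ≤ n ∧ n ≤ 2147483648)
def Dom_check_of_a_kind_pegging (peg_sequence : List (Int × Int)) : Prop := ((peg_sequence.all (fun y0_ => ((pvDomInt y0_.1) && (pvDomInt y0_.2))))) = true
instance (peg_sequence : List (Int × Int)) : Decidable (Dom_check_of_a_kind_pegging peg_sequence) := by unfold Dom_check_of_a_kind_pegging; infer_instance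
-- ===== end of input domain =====

-- B replaces A's neighbour-by-neighbour tally loop with run-length grouping (outer loop
-- skips maximal same-rank runs counting groups g, returns n - g + 1); objective: alternative.

-- ===== PORT A =====
-- A's while loop: i walks 1 .. len-1, tally bumped when ranks at i and i-1 match
def pvALoop (xs : List (Int × Int)) (i : Nat) (tally : Int) : Int :=
  if i < xs.length then
    pvALoop xs (i + 1)
      (if (xs.getD i default).1 == (xs.getD (i - 1) default).1 then tally + 1 else tally)
  else tally
termination_by xs.length - i

def check_of_a_kind_pegging (peg_sequence : List (Int × Int)) : Int :=
  if peg_sequence.length = 0 then 0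
  else pvALoop peg_sequence 1 1

-- ===== PORT B =====
-- B's inner while loop: advance i past all elements whose rank equals `rank`
def pvRunEnd (xs : List (Int × Int)) (rank : Int) (i : Nat) : Nat :=
  if i < xs.length then
    (if (xs.getD i default).1 == rank then pvRunEnd xs rank (i + 1) else i)
  else i
termination_by xs.length - i

theorem pvRunEnd_ge (xs : List (Int × Int)) (rank : Int) (i : Nat) : i ≤ pvRunEnd xs rank i := by
  rw [pvRunEnd]
  split
  · split
    · have := pvRunEnd_ge xs rank (i + 1)
      omega
    · exact le_refl i
  · exact le_refl i
termination_by xs.length - i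

-- B's outer while loop: strip one maximal run per iteration, counting groups
def pvGroupsLoop (xs : List (Int × Int)) (i : Nat) (g : Int) : Int :=
  if h : i < xs.length then
    pvGroupsLoop xs (pvRunEnd xs (xs.getD i default).1 (i + 1)) (g + 1)
  else g
termination_by xs.length - i
decreasing_by
  have := pvRunEnd_ge xs (xs.getD i default).1 (i + 1)
  omega

def check_of_a_kind_pegging_alt (peg_sequence : List (Int × Int)) : Int :=
  if peg_sequence = [] then 0
  else (peg_sequence.length : Int) - pvGroupsLoop peg_sequence 0 0 + 1

-- ===== PRECONDITION & SPEC =====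
def Spec_check_of_a_kind_pegging (peg_sequence : List (Int × Int)) (out : Int) : Prop := out = check_of_a_kind_pegging_alt peg_sequence
instance (peg_sequence : List (Int × Int)) (out : Int) : Decidable (Spec_check_of_a_kind_pegging peg_sequence out) := by unfold Spec_check_of_a_kind_pegging; infer_instance

-- ===== CLAIM (what is proved, stated in full; the proofs are below) =====
def Claim_equal_check_of_a_kind_pegging : Prop := ∀ (peg_sequence : List (Int × Int)), Dom_check_of_a_kind_pegging peg_sequence → Spec_check_of_a_kind_pegging peg_sequence (check_of_a_kind_pegging peg_sequence)

-- ===== LEMMAS AND PROOFS =====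

-- number of adjacent equal-rank pairs
def pvMatches : List (Int × Int) → Int
  | a :: b :: t => (if a.1 == b.1 then 1 else 0) + pvMatches (b :: t)
  | _ => 0

theorem pvMatches_small (xs : List (Int × Int)) (h : xs.length ≤ 1) : pvMatches xs = 0 := by
  match xs with
  | [] => rfl
  | [a] => rfl
  | a :: b :: t => simp at h

theorem pvALoop_eq_aux (xs : List (Int × Int)) : ∀ k i tally, xs.length - i ≤ k → 1 ≤ i →
    pvALoop xs i tally = tally + pvMatches (xs.drop (i - 1)) := by
  intro k
  induction k with
  | zero =>
    intro i tally hk hi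
    have h : ¬ i < xs.length := by omega
    rw [pvALoop]
    simp only [h, if_false]
    rw [pvMatches_small]
    · ring
    · have := List.length_drop (l := xs) (i := i - 1)
      omega
  | succ k ih' =>
    intro i tally hk hi
    by_cases h : i < xs.length
    case neg =>
      rw [pvALoop]
      simp only [h, if_false]
      rw [pvMatches_small]
      · ring
      · have := List.length_drop (l := xs) (i := i - 1)
        omega
    rw [pvALoop]
    simp only [h, if_true]
    have ih : ∀ tally, pvALoop xs (i + 1) tally = tally + pvMatches (xs.drop (i + 1 - 1)) :=
      fun tally => ih' (i + 1) tally (by omega) (by omega)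
    rw [ih]
    have h1 : i - 1 < xs.length := by omega
    have hd1 : xs.drop (i - 1) = xs[i - 1] :: xs.drop (i - 1 + 1) :=
      List.drop_eq_getElem_cons h1
    have h2 : i - 1 + 1 = i := by omega
    have hd2 : xs.drop i = xs[i] :: xs.drop (i + 1) := List.drop_eq_getElem_cons h
    rw [hd1, h2, hd2, pvMatches]
    have g1 : xs.getD i default = xs[i] := List.getD_eq_getElem xs default h
    have g2 : xs.getD (i - 1) default = xs[i - 1] := List.getD_eq_getElem xs default h1
    rw [g1, g2]
    have : (i + 1 - 1) = i := by omega
    rw [this, hd2]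
    by_cases hb : xs[i].1 == xs[i - 1].1
    · have hb' : xs[i - 1].1 == xs[i].1 := by
        simp only [beq_iff_eq] at hb ⊢; omega
      simp [hb, hb']; ring
    · have hb' : ¬ (xs[i - 1].1 == xs[i].1) := by
        simp only [beq_iff_eq] at hb ⊢; omega
      simp [hb, hb']

theorem pvALoop_eq (xs : List (Int × Int)) (i : Nat) (tally : Int) (hi : 1 ≤ i) :
    pvALoop xs i tally = tally + pvMatches (xs.drop (i - 1)) :=
  pvALoop_eq_aux xs (xs.length - i) i tally (le_refl _) hi

theorem pvRunEnd_le (xs : List (Int × Int)) (rank : Int) (i : Nat) (h : i ≤ xs.length) :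
    pvRunEnd xs rank i ≤ xs.length := by
  rw [pvRunEnd]
  split
  · split
    · exact pvRunEnd_le xs rank (i + 1) (by omega)
    · omega
  · omega
termination_by xs.length - i

-- the inner scan splits the matches of the tail at the run boundary
theorem pvRunEnd_matches (xs : List (Int × Int)) (rank : Int) :
    ∀ j, 1 ≤ j → j ≤ xs.length → (xs.getD (j - 1) default).1 = rank →
    pvMatches (xs.drop (j - 1)) =
      ((pvRunEnd xs rank j : Int) - j) + pvMatches (xs.drop (pvRunEnd xs rank j)) := by
  intro j h1 h2 hr
  rw [pvRunEnd]
  by_cases h : j < xs.length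
  case neg =>
    simp only [h, if_false]
    have hj : j = xs.length := by omega
    rw [pvMatches_small _ (by simp; omega)]
    rw [pvMatches_small _ (by simp; omega)]
    omega
  simp only [h, if_true]
  by_cases hb : (xs.getD j default).1 == rank
  · simp only [hb, if_true]
    have ih := pvRunEnd_matches xs rank (j + 1) (by omega) (by omega)
      (by simpa using (beq_iff_eq.mp hb))
    have h1' : j - 1 < xs.length := by omega
    have hd1 : xs.drop (j - 1) = xs[j - 1] :: xs.drop (j - 1 + 1) :=
      List.drop_eq_getElem_cons h1'
    have h2' : j - 1 + 1 = j := by omega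
    have hd2 : xs.drop j = xs[j] :: xs.drop (j + 1) := List.drop_eq_getElem_cons h
    have hrj : xs[j].1 = rank := by
      have := List.getD_eq_getElem xs default h
      rw [this] at hb; exact beq_iff_eq.mp hb
    have hrj1 : xs[j - 1].1 = rank := by
      have := List.getD_eq_getElem xs default h1'
      rw [this] at hr; exact hr
    rw [hd1, h2', hd2, pvMatches, ← hd2]
    have hsimp : (j + 1 - 1) = j := by omega
    rw [hsimp] at ih
    rw [ih]
    have hbeq : (xs[j - 1].1 == xs[j].1) = true := by
      rw [beq_iff_eq, hrj1, hrj]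
    rw [if_pos hbeq]
    have hge := pvRunEnd_ge xs rank (j + 1)
    push_cast
    omega
  · simp only [hb]
    have h1' : j - 1 < xs.length := by omega
    have hd1 : xs.drop (j - 1) = xs[j - 1] :: xs.drop (j - 1 + 1) :=
      List.drop_eq_getElem_cons h1'
    have h2' : j - 1 + 1 = j := by omega
    have hd2 : xs.drop j = xs[j] :: xs.drop (j + 1) := List.drop_eq_getElem_cons h
    rw [hd1, h2', hd2, pvMatches, ← hd2]
    have hrj1 : xs[j - 1].1 = rank := by
      have := List.getD_eq_getElem xs default h1'
      rw [this] at hr; exact hr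
    have hrj : ¬ xs[j].1 = rank := by
      have := List.getD_eq_getElem xs default h
      rw [this] at hb; simpa using hb
    have hbeq : (xs[j - 1].1 == xs[j].1) = false := by
      rw [beq_eq_false_iff_ne, hrj1]; exact fun hc => hrj hc.symm
    rw [hbeq]
    simp
termination_by j => xs.length - j

-- outer-loop invariant: groups counted so far + remaining matches account for the rest
theorem pvGroupsLoop_eq (xs : List (Int × Int)) :
    ∀ i g, i ≤ xs.length →
    pvGroupsLoop xs i g + pvMatches (xs.drop i) = g + ((xs.length : Int) - i) := by
  intro i g hle
  rw [pvGroupsLoop]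
  by_cases h : i < xs.length
  case neg =>
    simp only [h, dif_neg, not_false_iff]
    have : i = xs.length := by omega
    subst this
    rw [pvMatches_small _ (by simp)]
    omega
  simp only [h, dif_pos]
  have he_ge := pvRunEnd_ge xs (xs.getD i default).1 (i + 1)
  have he_le := pvRunEnd_le xs (xs.getD i default).1 (i + 1) (by omega)
  have ih := pvGroupsLoop_eq xs (pvRunEnd xs (xs.getD i default).1 (i + 1)) (g + 1) he_le
  have hm := pvRunEnd_matches xs (xs.getD i default).1 (i + 1) (by omega) (by omega)
    (by simp)
  have hsimp : (i + 1 - 1) = i := by omega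
  rw [hsimp] at hm
  rw [hm]
  push_cast at ih ⊢
  omega
termination_by i => xs.length - i
decreasing_by
  have := pvRunEnd_ge xs (xs.getD i default).1 (i + 1)
  omega

-- ===== VERDICT (by name: the statement is the Claim_ definition above) =====
theorem check_of_a_kind_pegging_spec : Claim_equal_check_of_a_kind_pegging := by
  intro xs _
  unfold Spec_check_of_a_kind_pegging check_of_a_kind_pegging check_of_a_kind_pegging_alt
  by_cases hx : xs = []
  · simp [hx]
  · have hl : xs.length ≠ 0 := by simpa using hx
    simp only [hx, hl, if_false]
    rw [pvALoop_eq xs 1 1 (le_refl 1)]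
    have hg := pvGroupsLoop_eq xs 0 0 (by omega)
    simp only [List.drop_zero, Nat.cast_zero, sub_zero, zero_add] at hg
    simp only [Nat.sub_self, List.drop_zero]
    omega
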